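-- pv_equiv track=rewrite | github.com/LinxISA/LinxCore | tools/generate/opcode_catalog_lib.py | _pattern_to_mask_match
-- ===== SOURCE A (Python) =====
-- def _pattern_to_mask_match(bits: str) -> tuple[int, int]:
--     mask = 0
--     match = 0
--     for ch in bits:
--         mask <<= 1
--         match <<= 1
--         if ch in "01":
--             mask |= 1
--             if ch == "1":
--                 match |= 1
--     return mask, match
-- ===== SOURCE B (Python) =====
-- def _pattern_to_mask_match(bits: str) -> tuple[int, int]:
--     rev = list(enumerate(reversed(bits)))
--     mask = sum(2 ** i for i, ch in rev if ch in "01")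
--     match = sum(2 ** i for i, ch in rev if ch == "1")
--     return mask, match
-- ===== Notes on version B (the rewrite author's own statement) =====
-- stated objective: idiomatic
-- what changed: Replaces A's left-to-right shift-and-OR accumulator loop with two positional-weight generator sums (sum of 2**i over the reversed, enumerated pattern), one per result component.
import Mathlib
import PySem

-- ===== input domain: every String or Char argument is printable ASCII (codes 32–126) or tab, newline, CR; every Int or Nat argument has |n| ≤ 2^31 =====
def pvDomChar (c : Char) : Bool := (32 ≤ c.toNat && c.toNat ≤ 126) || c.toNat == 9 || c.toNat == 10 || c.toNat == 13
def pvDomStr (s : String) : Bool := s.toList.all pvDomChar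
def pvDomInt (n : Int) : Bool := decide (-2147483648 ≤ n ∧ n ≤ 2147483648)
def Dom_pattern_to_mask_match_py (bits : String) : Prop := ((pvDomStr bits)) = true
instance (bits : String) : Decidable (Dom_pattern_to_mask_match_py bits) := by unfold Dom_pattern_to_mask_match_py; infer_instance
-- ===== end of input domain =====

-- B replaces A's shift-and-OR accumulator loop by two positional-weight sums
-- (sum of 2**i over the reversed, enumerated pattern); objective: idiomatic.

-- ===== PORT A =====
def pattern_to_mask_match_py (bits : String) : Int × Int :=
  bits.toList.foldl
    (fun (st : Int × Int) ch =>
      let mask := st.1 <<< (1 : Nat)        -- mask <<= 1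
      let mtch := st.2 <<< (1 : Nat)        -- match <<= 1
      if PySem.Str.isIn (String.ofList [ch]) "01" then   -- ch in "01"
        let mask := Int.lor mask 1          -- mask |= 1
        let mtch := if ch == '1' then Int.lor mtch 1 else mtch   -- match |= 1
        (mask, mtch)
      else (mask, mtch))
    (0, 0)

-- ===== PORT B =====
-- `2 ** i`: the index produced by enumerate is ≥ 0, so `.toNat` on the exponent is exact
def pattern_to_mask_match_py_alt (bits : String) : Int × Int :=
  let rev := PySem.List.enumerate bits.toList.reverse
  let mask := ((rev.filter (fun p => PySem.Str.isIn (String.ofList [p.2]) "01")).map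
                (fun p => (2 : Int) ^ p.1.toNat)).sum
  let mtch := ((rev.filter (fun p => p.2 == '1')).map
                (fun p => (2 : Int) ^ p.1.toNat)).sum
  (mask, mtch)

-- ===== PRECONDITION & SPEC =====
def Spec_pattern_to_mask_match_py (bits : String) (out : Int × Int) : Prop := out = pattern_to_mask_match_py_alt bits
instance (bits : String) (out : Int × Int) : Decidable (Spec_pattern_to_mask_match_py bits out) := by unfold Spec_pattern_to_mask_match_py; infer_instance

-- ===== CLAIM (what is proved, stated in full; the proofs are below) =====
def Claim_equal_pattern_to_mask_match_py : Prop := ∀ (bits : String), Dom_pattern_to_mask_match_py bits → Spec_pattern_to_mask_match_py bits (pattern_to_mask_match_py bits)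

-- ===== LEMMAS AND PROOFS =====

-- common characterisation: high-bit-first recursion over the character list
def gMask : List Char → Nat
  | [] => 0
  | c :: cs => (if c = '0' ∨ c = '1' then 2 ^ cs.length else 0) + gMask cs

def gMatch : List Char → Nat
  | [] => 0
  | c :: cs => (if c = '1' then 2 ^ cs.length else 0) + gMatch cs

-- A's loop body, named for the proofs (pattern_to_mask_match_py = foldl stepA (0,0), by rfl)
def stepA (st : Int × Int) (ch : Char) : Int × Int :=
  let mask := st.1 <<< (1 : Nat)
  let mtch := st.2 <<< (1 : Nat)
  if PySem.Str.isIn (String.ofList [ch]) "01" then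
    let mask := Int.lor mask 1
    let mtch := if ch == '1' then Int.lor mtch 1 else mtch
    (mask, mtch)
  else (mask, mtch)

theorem portA_eq_foldl (bits : String) :
    pattern_to_mask_match_py bits = bits.toList.foldl stepA (0, 0) := rfl

theorem isIn_single (c : Char) : PySem.Str.isIn (String.ofList [c]) "01" = (c == '0' || c == '1') := by
  rw [Bool.eq_iff_iff, PySem.Str.isIn_iff_infix]
  simp only [String.toList_ofList]
  constructor
  · intro h
    have hm : c ∈ ("01".toList) := h.mem (by simp)
    simp at hm ⊢
    rcases hm with h|h <;> simp [h]
  · intro h; simp at h; rcases h with h|h <;> subst h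
    · exact ⟨[], ['1'], rfl⟩
    · exact ⟨['0'], [], rfl⟩

theorem isIn_single_chars (c : Char) : PySem.Chars.isIn [c] ['0', '1'] = (c == '0' || c == '1') := by
  have h := isIn_single c
  simpa using h

theorem nat_two_mul_lor_one (n : Nat) : 2*n ||| 1 = 2*n+1 := by
  have := Nat.lor_bit false n true 0
  simpa [Nat.bit] using this

theorem int_shift_one (k : Nat) : ((k : Int) <<< (1 : Nat)) = ((2 * k : Nat) : Int) := by
  rw [Int.shiftLeft_eq]; push_cast; ring

theorem int_lor_one (k : Nat) : Int.lor ((2 * k : Nat) : Int) 1 = ((2 * k + 1 : Nat) : Int) := by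
  have h1 : ((2 * k : Nat) : Int) = Int.ofNat (2 * k) := rfl
  rw [h1, show (1 : Int) = Int.ofNat 1 from rfl,
    show (Int.ofNat (2*k)).lor (Int.ofNat 1) = Int.ofNat ((2*k) ||| 1) from rfl,
    nat_two_mul_lor_one]
  rfl

theorem stepA_eq (m t : Nat) (c : Char) :
    stepA ((m : Int), (t : Int)) c
      = ((↑(2 * m + (if c = '0' ∨ c = '1' then 1 else 0)) : Int),
         (↑(2 * t + (if c = '1' then 1 else 0)) : Int)) := by
  unfold stepA
  simp only [isIn_single, int_shift_one]
  by_cases h1 : c = '1'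
  · subst h1
    simp only [if_true, show ('1' == '1') = true from rfl, int_lor_one]
    norm_num
  · by_cases h0 : c = '0'
    · subst h0
      simp only [show ('0' == '1') = false from rfl, int_lor_one]
      simp [h1]
    · have hb : (c == '0' || c == '1') = false := by simp [h0, h1]
      simp [hb, h0, h1]

theorem A_fold (l : List Char) : ∀ (m t : Nat),
    l.foldl stepA ((m : Int), (t : Int))
      = ((↑(m * 2 ^ l.length + gMask l) : Int), (↑(t * 2 ^ l.length + gMatch l) : Int)) := by
  induction l with
  | nil => intro m t; simp [gMask, gMatch]
  | cons c cs ih =>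
    intro m t
    rw [List.foldl_cons, stepA_eq, ih]
    refine Prod.ext ?_ ?_ <;> simp only [Nat.cast_inj]
    · simp only [gMask, List.length_cons, pow_succ]
      by_cases h : c = '0' ∨ c = '1' <;> simp [h] <;> ring
    · simp only [gMatch, List.length_cons, pow_succ]
      by_cases h : c = '1' <;> simp [h] <;> ring

-- B's positional sums, characterised by the same gMask/gMatch
theorem B_sums (l : List Char) :
    (((PySem.List.enumerate l.reverse).filter (fun p => PySem.Str.isIn (String.ofList [p.2]) "01")).map
        (fun p => (2 : Int) ^ p.1.toNat)).sum = (↑(gMask l) : Int)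
  ∧ (((PySem.List.enumerate l.reverse).filter (fun p => p.2 == '1')).map
        (fun p => (2 : Int) ^ p.1.toNat)).sum = (↑(gMatch l) : Int) := by
  induction l with
  | nil => simp [PySem.List.enumerate_nil, gMask, gMatch]
  | cons c cs ih =>
    have henum : PySem.List.enumerate ((c :: cs).reverse) 0
        = PySem.List.enumerate cs.reverse 0 ++ [((cs.length : Int), c)] := by
      rw [show (c :: cs).reverse = cs.reverse ++ [c] by simp,
        PySem.List.enumerate_append, PySem.List.enumerate_cons, PySem.List.enumerate_nil]
      simp
    constructor
    · rw [henum, List.filter_append, List.map_append, List.sum_append, ih.1]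
      by_cases h : (c = '0' ∨ c = '1')
      · have hb : PySem.Chars.isIn [c] ['0', '1'] = true := by
          rw [isIn_single_chars]; rcases h with h|h <;> simp [h]
        simp only [List.filter_cons, List.filter_nil]
        simp [hb, gMask, h, Int.toNat_natCast]
        ring
      · have hb : PySem.Chars.isIn [c] ['0', '1'] = false := by
          rw [isIn_single_chars]
          simp only [not_or] at h
          simp [h.1, h.2]
        simp only [List.filter_cons, List.filter_nil]
        simp [hb, gMask, h]
    · rw [henum, List.filter_append, List.map_append, List.sum_append, ih.2]
      by_cases h : c = '1'
      · subst h
        simp only [List.filter_cons, List.filter_nil]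
        simp [gMatch, Int.toNat_natCast]
        ring
      · have hb : (c == '1') = false := by simp [h]
        simp only [List.filter_cons, List.filter_nil]
        simp [hb, gMatch, h]

theorem portB_eq (bits : String) :
    pattern_to_mask_match_py_alt bits
      = ((↑(gMask bits.toList) : Int), (↑(gMatch bits.toList) : Int)) := by
  have h := B_sums bits.toList
  unfold pattern_to_mask_match_py_alt
  exact Prod.ext (by simpa using h.1) (by simpa using h.2)

-- ===== VERDICT (by name: the statement is the Claim_ definition above) =====
theorem pattern_to_mask_match_py_spec : Claim_equal_pattern_to_mask_match_py := by
  intro bits _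
  unfold Spec_pattern_to_mask_match_py
  rw [portA_eq_foldl, portB_eq,
    show ((0:Int),(0:Int)) = (((0:Nat):Int),((0:Nat):Int)) by norm_num,
    A_fold bits.toList 0 0]
  simp
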